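-- pv_equiv track=rewrite | github.com/rakesh-suru/leetcode_solutions | 3731/sol4.py | findMissingElements
-- ===== SOURCE A (Python) =====
-- from typing import List
--
-- def findMissingElements(nums: List[int]) -> List[int]:
--     nums.sort()
--     ans = []
--
--     for i in range(len(nums) - 1):
--         curr = nums[i]
--         nextt = nums[i + 1]
--         for x in range(curr + 1, nextt):
--             ans.append(x)
--
--     return ans
-- ===== SOURCE B (Python) =====
-- from typing import List
--
-- def findMissingElements(nums: List[int]) -> List[int]:
--     nums.sort()  # keep A's in-place sort side effect
--     if not nums:
--         return []
--     present = set(nums)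
--     lo, hi = nums[0], nums[-1]
--     return [x for x in range(lo, hi + 1) if x not in present]
-- ===== Notes on version B (the rewrite author's own statement) =====
-- stated objective: idiomatic
-- what changed: Replaces the nested gap-walking loops over consecutive sorted pairs by one pass over the whole value range [min, max] with a set membership test.
import Mathlib
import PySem

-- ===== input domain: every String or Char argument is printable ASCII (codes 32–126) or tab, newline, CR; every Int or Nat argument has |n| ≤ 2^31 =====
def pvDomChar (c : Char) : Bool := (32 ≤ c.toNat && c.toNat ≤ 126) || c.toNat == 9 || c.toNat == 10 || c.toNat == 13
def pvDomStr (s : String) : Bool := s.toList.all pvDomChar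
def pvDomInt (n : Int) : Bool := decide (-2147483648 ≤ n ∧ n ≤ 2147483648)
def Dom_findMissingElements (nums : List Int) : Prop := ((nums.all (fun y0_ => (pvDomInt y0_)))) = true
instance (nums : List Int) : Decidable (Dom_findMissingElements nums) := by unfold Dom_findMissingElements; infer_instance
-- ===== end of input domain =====

-- B replaces A's nested gap-walking loops by one range pass with a set membership test
-- (same result; equivalence is about the RETURN value — both sort their argument in place in Python).

-- ===== PORT A =====
-- nums.sort(); then for i in range(len(nums)-1): append range(nums[i]+1, nums[i+1]).
-- nums[i] / nums[i+1] are always in range here, so pyGetD with default 0 is exact.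
def findMissingElements (nums : List Int) : List Int :=
  let s := PySem.List.sorted nums (fun x => x)
  (PySem.List.pyRange 0 ((s.length : Int) - 1)).foldl
    (fun ans i =>
      let curr := PySem.List.pyGetD s i 0
      let nextt := PySem.List.pyGetD s (i + 1) 0
      ans ++ PySem.List.pyRange (curr + 1) nextt) []

-- ===== PORT B =====
def findMissingElements_alt (nums : List Int) : List Int :=
  let s := PySem.List.sorted nums (fun x => x)
  if s = [] then []
  else
    let present := PySem.Set.ofList s
    let lo := PySem.List.pyGetD s 0 0        -- nums[0], s nonempty
    let hi := PySem.List.pyGetD s (-1) 0     -- nums[-1], s nonempty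
    (PySem.List.pyRange lo (hi + 1)).filter (fun x => !(present.contains x))

-- ===== PRECONDITION & SPEC =====
def Spec_findMissingElements (nums : List Int) (out : List Int) : Prop := out = findMissingElements_alt nums
instance (nums : List Int) (out : List Int) : Decidable (Spec_findMissingElements nums out) := by unfold Spec_findMissingElements; infer_instance

-- ===== CLAIM (what is proved, stated in full; the proofs are below) =====
def Claim_equal_findMissingElements : Prop := ∀ (nums : List Int), Dom_findMissingElements nums → Spec_findMissingElements nums (findMissingElements nums)

-- ===== LEMMAS AND PROOFS =====

-- the gaps between consecutive elements, as a structural recursion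
def pvChain : List Int → List Int
  | a :: b :: t => PySem.List.pyRange (a + 1) b ++ pvChain (b :: t)
  | _ => []

theorem pvRange_nil {a b : Int} (h : b ≤ a) : PySem.List.pyRange a b = [] := by
  simp [PySem.List.pyRange]
  omega

-- A's index loop, as a flatMap over the index range, equals the structural gap walk
theorem pvFlat (s : List Int) :
    (PySem.List.pyRange 0 ((s.length : Int) - 1)).flatMap
      (fun i => PySem.List.pyRange (PySem.List.pyGetD s i 0 + 1) (PySem.List.pyGetD s (i + 1) 0))
    = pvChain s := by
  induction s with
  | nil => simp [pvChain]
  | cons a rest ih =>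
    cases rest with
    | nil => simp [pvChain]
    | cons b t =>
      have hlen : ((a :: b :: t).length : Int) - 1 = ((t.length + 1 : Nat) : Int) := by
        simp
      rw [hlen, PySem.List.pyRange_zero_natCast, List.flatMap_map, List.range_succ_eq_map,
        List.flatMap_cons, List.flatMap_map]
      simp only [Nat.succ_eq_add_one, Nat.cast_zero]
      have h0 : PySem.List.pyGetD (a :: b :: t) 0 0 = a := by
        simpa using PySem.List.pyGetD_natCast (a :: b :: t) 0 0
      have h1 : PySem.List.pyGetD (a :: b :: t) (0 + 1) 0 = b := by
        simpa using PySem.List.pyGetD_natCast (a :: b :: t) 1 0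
      rw [h0, h1, pvChain]
      congr 1
      have hshift : ∀ k : Nat,
          PySem.List.pyRange (PySem.List.pyGetD (a :: b :: t) (((k + 1 : Nat) : Int)) 0 + 1)
            (PySem.List.pyGetD (a :: b :: t) ((((k + 1 : Nat) : Int)) + 1) 0)
          = PySem.List.pyRange (PySem.List.pyGetD (b :: t) ((k : Nat) : Int) 0 + 1)
            (PySem.List.pyGetD (b :: t) (((k : Nat) : Int) + 1) 0) := by
        intro k
        have e1 : PySem.List.pyGetD (a :: b :: t) (((k + 1 : Nat) : Int)) 0
            = PySem.List.pyGetD (b :: t) ((k : Nat) : Int) 0 := by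
          rw [PySem.List.pyGetD_natCast, PySem.List.pyGetD_natCast]
          rfl
        have e2 : PySem.List.pyGetD (a :: b :: t) ((((k + 1 : Nat) : Int)) + 1) 0
            = PySem.List.pyGetD (b :: t) (((k : Nat) : Int) + 1) 0 := by
          have c1 : (((k + 1 : Nat) : Int)) + 1 = ((k + 2 : Nat) : Int) := by
            push_cast; ring
          have c2 : ((k : Nat) : Int) + 1 = ((k + 1 : Nat) : Int) := by push_cast; ring
          rw [c1, c2, PySem.List.pyGetD_natCast, PySem.List.pyGetD_natCast]
          rfl
        rw [e1, e2]
      rw [List.flatMap_congr (fun k _ => hshift k)]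
      have hlen2 : (((b :: t).length : Int)) - 1 = ((t.length : Nat) : Int) := by
        simp
      rw [← ih, hlen2, PySem.List.pyRange_zero_natCast, List.flatMap_map]

-- the sorted-range filter equals the structural gap walk
theorem pvFilter (rest : List Int) : ∀ (a : Int),
    (a :: rest).Pairwise (· ≤ ·) →
    (PySem.List.pyRange a (rest.getLastD a + 1)).filter (fun x => !(decide (x ∈ a :: rest)))
      = pvChain (a :: rest) := by
  induction rest with
  | nil =>
    intro a _
    rw [List.getLastD_nil,
      PySem.List.pyRange_one_cons (by omega : a < a + 1), pvRange_nil (le_refl (a + 1))]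
    simp [pvChain]
  | cons b t ih =>
    intro a hpw
    have hab : a ≤ b := (List.pairwise_cons.mp hpw).1 b (by simp)
    have hpw' : (b :: t).Pairwise (· ≤ ·) := (List.pairwise_cons.mp hpw).2
    have hbmem : ∀ y ∈ b :: t, b ≤ y := by
      intro y hy
      rcases List.mem_cons.mp hy with h | h
      · omega
      · exact (List.pairwise_cons.mp hpw').1 y h
    have hL : b ≤ t.getLastD b := hbmem _ List.getLastD_mem_cons
    have hlast : (b :: t).getLastD a = t.getLastD b := by
      cases t <;> simp [List.getLastD]
    rw [hlast]
    rw [PySem.List.pyRange_one_append a b (t.getLastD b + 1) hab (by omega)]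
    rw [List.filter_append]
    have hfirst : (PySem.List.pyRange a b).filter (fun x => !(decide (x ∈ a :: b :: t)))
        = PySem.List.pyRange (a + 1) b := by
      rcases lt_or_eq_of_le hab with hlt | heq
      · rw [PySem.List.pyRange_one_cons hlt]
        rw [List.filter_cons]
        simp only [List.mem_cons, true_or, decide_true, Bool.not_true, Bool.false_eq_true,
          if_false]
        apply List.filter_eq_self.mpr
        intro x hx
        have hx' := PySem.List.mem_pyRange_one.mp hx
        have hxt : x ∉ t := fun hmem => by
          have := hbmem x (List.mem_cons_of_mem _ hmem)
          omega
        simp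
        exact ⟨by omega, by omega, hxt⟩
      · subst heq
        rw [pvRange_nil (le_refl a), pvRange_nil (by omega : a ≤ a + 1)]
        simp
    have hsecond : (PySem.List.pyRange b (t.getLastD b + 1)).filter
          (fun x => !(decide (x ∈ a :: b :: t)))
        = (PySem.List.pyRange b (t.getLastD b + 1)).filter (fun x => !(decide (x ∈ b :: t))) := by
      apply List.filter_congr
      intro x hx
      have hx' := PySem.List.mem_pyRange_one.mp hx
      have : (x ∈ a :: b :: t) ↔ (x ∈ b :: t) := by
        simp only [List.mem_cons]
        constructor
        · rintro (h | h | h)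
          · left; omega
          · left; exact h
          · right; exact h
        · rintro (h | h)
          · right; left; exact h
          · right; right; exact h
      simp [this]
    rw [hfirst, hsecond, ih b hpw', pvChain]

theorem findMissingElements_eq_chain (nums : List Int) :
    findMissingElements nums = pvChain (PySem.List.sorted nums (fun x => x)) := by
  unfold findMissingElements
  rw [PySem.List.foldl_append_eq_flatMap]
  simpa using pvFlat (PySem.List.sorted nums (fun x => x))

theorem pvGetD_neg_one (a : Int) (rest : List Int) :
    PySem.List.pyGetD (a :: rest) (-1) 0 = rest.getLastD a := by
  induction rest generalizing a with
  | nil => rfl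
  | cons b t ih =>
    have h1 : PySem.List.pyGetD (a :: b :: t) (-1) 0 = PySem.List.pyGetD (b :: t) (-1) 0 := by
      simp [PySem.List.pyGetD, PySem.List.pyGet?, PySem.List.pyIdx?]
      omega
    rw [h1, ih]
    cases t <;> simp [List.getLastD]

-- ===== VERDICT (by name: the statement is the Claim_ definition above) =====
theorem findMissingElements_spec : Claim_equal_findMissingElements := by
  intro nums _
  unfold Spec_findMissingElements
  rw [findMissingElements_eq_chain]
  unfold findMissingElements_alt
  set s := PySem.List.sorted nums (fun x => x) with hs
  by_cases hnil : s = []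
  · simp [hnil, pvChain]
  · simp only [if_neg hnil]
    obtain ⟨a, rest, hcons⟩ := List.exists_cons_of_ne_nil hnil
    have hpw : s.Pairwise (· ≤ ·) := PySem.List.sorted_pairwise nums (fun x => x)
    rw [hcons] at hpw ⊢
    have h0 : PySem.List.pyGetD (a :: rest) 0 0 = a := by
      simpa using PySem.List.pyGetD_natCast (a :: rest) 0 0
    rw [h0, pvGetD_neg_one]
    rw [← pvFilter rest a hpw]
    apply List.filter_congr
    intro x _
    congr 1
    rw [← hcons]
    have hiff := PySem.Set.contains_iff (PySem.Set.ofList s) x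
    rw [PySem.Set.mem_ofList] at hiff
    by_cases hxs : x ∈ s
    · simp [hxs]
    · have hc : (PySem.Set.ofList s).contains x = false := by
        rcases Bool.eq_false_or_eq_true ((PySem.Set.ofList s).contains x) with h | h
        · exact absurd (hiff.mp h) hxs
        · exact h
      simp [hxs]
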